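-- pv_equiv track=rewrite | github.com/andyrdt/mi | SPAR/refusal_mi/instruction_dataset0.py | gen_instructions
-- ===== SOURCE A (Python) =====
-- from typing import List
--
-- def gen_instructions(
--
--     instruction_templates: List[str],
--     objects: List[str],
--     verbs: List[str],
-- ) -> List[str]:
--     instructions = []
--     for instruction_template in instruction_templates:
--         for object in objects:
--             for verb in verbs:
--                 instruction = instruction_template
--                 instruction = instruction.replace("{object}", object)
--                 instruction = instruction.replace("{verb}", verb)
--                 instructions.append(instruction)
--     return instructions
-- ===== SOURCE B (Python) =====
-- def gen_instructions(instruction_templates, objects, verbs):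
--     # Single flat loop over one mixed-radix index: k encodes (template, object, verb);
--     # divmod decodes it, replacing the nested triple loop with index arithmetic.
--     O, V = len(objects), len(verbs)
--     out = []
--     for k in range(len(instruction_templates) * O * V):
--         i, r = divmod(k, O * V)
--         j, l = divmod(r, V)
--         out.append(instruction_templates[i]
--                    .replace("{object}", objects[j])
--                    .replace("{verb}", verbs[l]))
--     return out
-- ===== Notes on version B (the rewrite author's own statement) =====
-- stated objective: alternative
-- what changed: Replaces the nested triple loop with a single flat loop over one mixed-radix index k in range(T*O*V), decoding (template, object, verb) positions by divmod and indexing the lists directly.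
import Mathlib
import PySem

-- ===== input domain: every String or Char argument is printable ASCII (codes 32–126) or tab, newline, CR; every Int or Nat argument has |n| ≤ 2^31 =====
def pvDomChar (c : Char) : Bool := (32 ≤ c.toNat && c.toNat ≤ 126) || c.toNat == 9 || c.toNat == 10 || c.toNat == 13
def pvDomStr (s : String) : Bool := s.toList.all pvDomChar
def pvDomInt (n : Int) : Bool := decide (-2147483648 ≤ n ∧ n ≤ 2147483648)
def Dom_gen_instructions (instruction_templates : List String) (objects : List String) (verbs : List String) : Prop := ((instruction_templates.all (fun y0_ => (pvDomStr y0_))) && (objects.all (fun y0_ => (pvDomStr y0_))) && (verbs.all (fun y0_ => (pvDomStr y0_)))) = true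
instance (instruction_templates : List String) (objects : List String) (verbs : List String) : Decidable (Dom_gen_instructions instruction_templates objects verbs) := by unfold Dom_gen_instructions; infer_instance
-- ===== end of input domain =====

-- B replaces the nested triple loop by a single flat loop over one mixed-radix index
-- decoded with divmod; alternative structure, same cost.

-- ===== PORT A =====
-- Port of A: triple nested loop appending one instruction at a time.
def gen_instructions (instruction_templates : List String) (objects : List String) (verbs : List String) : List String :=
  instruction_templates.foldl (fun acc t =>
    objects.foldl (fun acc o =>
      verbs.foldl (fun acc v =>
        acc ++ [PySem.Str.replace (PySem.Str.replace t "{object}" o) "{verb}" v]) acc) acc) []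

-- ===== PORT B =====
-- Port of B: one flat loop over k ∈ range(T*O*V); i,r = divmod(k, O*V); j,l = divmod(r, V).
-- k is a nonnegative loop counter, so Python's range/divmod are exactly List.range and
-- Nat division/modulo; every index is in range, so list indexing is getD (default unreachable).
def gen_instructions_alt (instruction_templates : List String) (objects : List String) (verbs : List String) : List String :=
  let O := objects.length
  let V := verbs.length
  (List.range (instruction_templates.length * O * V)).foldl (fun out k =>
    let i := k / (O * V)
    let r := k % (O * V)
    let j := r / V
    let l := r % V
    out ++ [PySem.Str.replace (PySem.Str.replace (instruction_templates.getD i "") "{object}" (objects.getD j "")) "{verb}" (verbs.getD l "")]) []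

-- ===== PRECONDITION & SPEC =====
def Spec_gen_instructions (instruction_templates : List String) (objects : List String) (verbs : List String) (out : List String) : Prop := out = gen_instructions_alt instruction_templates objects verbs
instance (instruction_templates : List String) (objects : List String) (verbs : List String) (out : List String) : Decidable (Spec_gen_instructions instruction_templates objects verbs out) := by unfold Spec_gen_instructions; infer_instance

-- ===== CLAIM (what is proved, stated in full; the proofs are below) =====
def Claim_equal_gen_instructions : Prop := ∀ (instruction_templates : List String) (objects : List String) (verbs : List String), Dom_gen_instructions instruction_templates objects verbs → Spec_gen_instructions instruction_templates objects verbs (gen_instructions instruction_templates objects verbs)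

-- ===== LEMMAS AND PROOFS =====

-- fold with append-singleton is map
theorem foldl_append_singleton {α β : Type} (xs : List α) (f : α → β) (acc : List β) :
    xs.foldl (fun a x => a ++ [f x]) acc = acc ++ xs.map f := by
  induction xs generalizing acc with
  | nil => simp
  | cons x xs ih => simp [ih]

-- mixed-radix splitting of a range
theorem range_mul_map {β : Type} (m n : ℕ) (f : ℕ → β) :
    (List.range (m * n)).map f
      = (List.range m).flatMap (fun i => (List.range n).map (fun j => f (n * i + j))) := by
  induction m generalizing f with
  | zero => simp
  | succ m ih =>
    have h : (m + 1) * n = n + m * n := by ring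
    rw [h, List.range_add, List.map_append, List.range_succ_eq_map, List.flatMap_cons,
      List.flatMap_map]
    congr 1
    · simp
    · rw [List.map_map]
      have hc : (f ∘ fun x => n + x) = (fun k => f (n + k)) := rfl
      rw [hc, ih (fun k => f (n + k))]
      have hfun : (fun i => (List.range n).map (fun j => f (n + (n * i + j))))
          = (fun i => (List.range n).map (fun j => f (n * i.succ + j))) := by
        funext i
        apply List.map_congr_left
        intro j _
        congr 1
        simp [Nat.succ_eq_add_one, Nat.mul_add]
        ring
      rw [hfun]

theorem map_range_getD {α β : Type} (xs : List α) (d : α) (h : α → β) :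
    (List.range xs.length).map (fun i => h (xs.getD i d)) = xs.map h := by
  induction xs with
  | nil => simp
  | cons x xs ih =>
    rw [List.length_cons, List.range_succ_eq_map, List.map_cons, List.map_map]
    have hc : ((fun i => h ((x :: xs).getD i d)) ∘ Nat.succ) = (fun i => h (xs.getD i d)) := by
      funext i; rfl
    rw [hc, ih]
    rfl

theorem flatMap_range_getD {α β : Type} (xs : List α) (d : α) (G : α → List β) :
    (List.range xs.length).flatMap (fun i => G (xs.getD i d)) = xs.flatMap G := by
  rw [List.flatMap_def, List.flatMap_def, map_range_getD]

-- A as a flatMap normal form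
theorem genA_normal (ts os vs : List String) :
    gen_instructions ts os vs
      = ts.flatMap (fun t => os.flatMap (fun o => vs.map (fun v =>
          PySem.Str.replace (PySem.Str.replace t "{object}" o) "{verb}" v))) := by
  unfold gen_instructions
  induction ts with
  | nil => rfl
  | cons t ts ih =>
    simp only [List.foldl_cons, List.flatMap_cons,
      PySem.List.foldl_append_eq_flatMap] at *
    rw [List.nil_append] at ih
    rw [ih]
    simp only [← List.map_eq_flatMap]
    simp

-- B as the same flatMap normal form
theorem genB_normal (ts os vs : List String) :
    gen_instructions_alt ts os vs
      = ts.flatMap (fun t => os.flatMap (fun o => vs.map (fun v =>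
          PySem.Str.replace (PySem.Str.replace t "{object}" o) "{verb}" v))) := by
  unfold gen_instructions_alt
  simp only []
  set O := os.length with hO
  set V := vs.length with hV
  rw [foldl_append_singleton, List.nil_append]
  have hsz : ts.length * O * V = ts.length * (O * V) := by ring
  rw [hsz, range_mul_map]
  rw [← flatMap_range_getD ts "" (fun t => os.flatMap (fun o => vs.map (fun v =>
        PySem.Str.replace (PySem.Str.replace t "{object}" o) "{verb}" v)))]
  rw [List.flatMap_def, List.flatMap_def]
  congr 1
  apply List.map_congr_left
  intro i hi
  rw [List.mem_range] at hi
  -- inner: split range (O*V) into object/verb indices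
  rw [range_mul_map O V]
  rw [← flatMap_range_getD os "" (fun o => vs.map (fun v =>
        PySem.Str.replace (PySem.Str.replace (ts.getD i "") "{object}" o) "{verb}" v))]
  rw [List.flatMap_def, List.flatMap_def]
  congr 1
  apply List.map_congr_left
  intro j hj
  rw [List.mem_range] at hj
  rw [← map_range_getD vs "" (fun v =>
        PySem.Str.replace (PySem.Str.replace (ts.getD i "") "{object}" (os.getD j "")) "{verb}" v)]
  apply List.map_congr_left
  intro l hl
  rw [List.mem_range] at hl
  have hr : V * j + l < O * V := by
    calc V * j + l < V * (j + 1) := by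
          have : V * (j + 1) = V * j + V := by ring
          omega
    _ ≤ V * O := Nat.mul_le_mul_left _ hj
    _ = O * V := by ring
  have h1 : (O * V * i + (V * j + l)) / (O * V) = i := by
    rw [Nat.mul_add_div (by omega), Nat.div_eq_of_lt hr]
    omega
  have h2 : (O * V * i + (V * j + l)) % (O * V) = V * j + l := by
    rw [Nat.mul_add_mod, Nat.mod_eq_of_lt hr]
  have h3 : (V * j + l) / V = j := by
    rw [Nat.mul_add_div (by omega), Nat.div_eq_of_lt hl]
    omega
  have h4 : (V * j + l) % V = l := by
    rw [Nat.mul_add_mod, Nat.mod_eq_of_lt hl]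
  simp only [h1, h2, h3, h4]

-- ===== VERDICT (by name: the statement is the Claim_ definition above) =====
theorem gen_instructions_spec : Claim_equal_gen_instructions := by
  intro ts os vs _
  unfold Spec_gen_instructions
  rw [genA_normal, genB_normal]
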